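-- pv_equiv track=rewrite | github.com/Code4life69/LocalPilot | app/prompt_builder.py | _category_from_recent_tools
-- ===== SOURCE A (Python) =====
-- def _category_from_recent_tools(current_tool_names: set[str]) -> str:
--     if any(name.startswith("browser_") for name in current_tool_names):
--         return "browser"
--     if any(name.startswith("desktop_") for name in current_tool_names) or {"take_screenshot", "analyze_screenshot"} & current_tool_names:
--         return "desktop"
--     if {"set_timer", "list_timers", "cancel_timer"} & current_tool_names:
--         return "timer"
--     if {"write_file", "read_file", "list_files", "restore_checkpoint"} & current_tool_names:
--         return "file"
--     if {"get_current_task", "list_sessions", "read_session"} & current_tool_names: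
--         return "memory"
--     return "general"
-- ===== SOURCE B (Python) =====
-- # B: single-pass reduction — classify each name to a priority rank, keep the minimum,
-- # map the final rank back to a category (A instead scans the whole set once per category).
-- _CATS = ("browser", "desktop", "timer", "file", "memory", "general")
--
--
-- def _rank(name):
--     if name.startswith("browser_"):
--         return 0
--     if name.startswith("desktop_") or name in ("take_screenshot", "analyze_screenshot"):
--         return 1
--     if name in ("set_timer", "list_timers", "cancel_timer"):
--         return 2
--     if name in ("write_file", "read_file", "list_files", "restore_checkpoint"):
--         return 3
--     if name in ("get_current_task", "list_sessions", "read_session"):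
--         return 4
--     return 5
--
--
-- def _category_from_recent_tools(current_tool_names: set[str]) -> str:
--     best = 5
--     for name in current_tool_names:
--         best = min(best, _rank(name))
--     return _CATS[best]
-- ===== Notes on version B (the rewrite author's own statement) =====
-- stated objective: alternative
-- what changed: Instead of A's five sequential per-category scans over the whole set, B classifies each name once to a numeric priority rank, keeps the minimum rank in a single pass, and maps the final rank back to its category.
import Mathlib
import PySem

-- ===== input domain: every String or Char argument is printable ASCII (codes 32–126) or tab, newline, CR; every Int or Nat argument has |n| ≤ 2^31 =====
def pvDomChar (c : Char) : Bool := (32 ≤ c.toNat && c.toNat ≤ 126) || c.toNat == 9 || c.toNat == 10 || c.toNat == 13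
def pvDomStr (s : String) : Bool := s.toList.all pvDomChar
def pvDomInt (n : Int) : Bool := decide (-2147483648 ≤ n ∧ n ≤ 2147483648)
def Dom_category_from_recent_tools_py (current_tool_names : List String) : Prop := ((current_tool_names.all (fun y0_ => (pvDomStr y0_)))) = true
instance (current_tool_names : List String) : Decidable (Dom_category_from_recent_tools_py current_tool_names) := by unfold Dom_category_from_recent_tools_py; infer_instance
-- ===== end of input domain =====

-- B replaces A's five per-category scans by a single pass taking the minimum per-name priority rank; equal result proved.


-- ===== PORT A =====
def category_from_recent_tools_py (current_tool_names : List String) : String :=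
  if current_tool_names.any (fun name => PySem.Str.startswith name "browser_") then "browser"
  else if current_tool_names.any (fun name => PySem.Str.startswith name "desktop_")
      || !(PySem.Set.inter (PySem.Set.ofList ["take_screenshot", "analyze_screenshot"]) current_tool_names).isEmpty then "desktop"
  else if !(PySem.Set.inter (PySem.Set.ofList ["set_timer", "list_timers", "cancel_timer"]) current_tool_names).isEmpty then "timer"
  else if !(PySem.Set.inter (PySem.Set.ofList ["write_file", "read_file", "list_files", "restore_checkpoint"]) current_tool_names).isEmpty then "file"
  else if !(PySem.Set.inter (PySem.Set.ofList ["get_current_task", "list_sessions", "read_session"]) current_tool_names).isEmpty then "memory"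
  else "general"

-- ===== PORT B =====
-- _CATS indexing: rank → category
def pvCat (r : Nat) : String :=
  match r with
  | 0 => "browser"
  | 1 => "desktop"
  | 2 => "timer"
  | 3 => "file"
  | 4 => "memory"
  | _ => "general"

-- _rank: each name's own priority (if-chain as in Source B)
def pvRank (n : String) : Nat :=
  if PySem.Str.startswith n "browser_" then 0
  else if PySem.Str.startswith n "desktop_" || n == "take_screenshot" || n == "analyze_screenshot" then 1
  else if n == "set_timer" || n == "list_timers" || n == "cancel_timer" then 2
  else if n == "write_file" || n == "read_file" || n == "list_files" || n == "restore_checkpoint" then 3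
  else if n == "get_current_task" || n == "list_sessions" || n == "read_session" then 4
  else 5

-- the 'best = min(best, _rank(name))' loop, then _CATS[best]
def category_from_recent_tools_py_alt (current_tool_names : List String) : String :=
  pvCat (current_tool_names.foldl (fun best name => min best (pvRank name)) 5)

-- ===== PRECONDITION & SPEC =====
def Spec_category_from_recent_tools_py (current_tool_names : List String) (out : String) : Prop := out = category_from_recent_tools_py_alt current_tool_names
instance (current_tool_names : List String) (out : String) : Decidable (Spec_category_from_recent_tools_py current_tool_names out) := by unfold Spec_category_from_recent_tools_py; infer_instance

-- ===== CLAIM (what is proved, stated in full; the proofs are below) =====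
def Claim_equal_category_from_recent_tools_py : Prop := ∀ (current_tool_names : List String), Dom_category_from_recent_tools_py current_tool_names → Spec_category_from_recent_tools_py current_tool_names (category_from_recent_tools_py current_tool_names)

-- ===== LEMMAS AND PROOFS =====

-- the per-name conditions of A's five branches
def pvC : Nat → String → Bool
  | 0, n => PySem.Str.startswith n "browser_"
  | 1, n => PySem.Str.startswith n "desktop_" || n == "take_screenshot" || n == "analyze_screenshot"
  | 2, n => n == "set_timer" || n == "list_timers" || n == "cancel_timer"
  | 3, n => n == "write_file" || n == "read_file" || n == "list_files" || n == "restore_checkpoint"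
  | 4, n => n == "get_current_task" || n == "list_sessions" || n == "read_session"
  | _, _ => false

theorem pvRank_le_of_c {i : Nat} {n : String} (hi : i ≤ 4) (h : pvC i n = true) : pvRank n ≤ i := by
  interval_cases i <;> simp [pvC] at h <;> simp [pvRank] <;> split_ifs <;> simp_all

theorem c_of_pvRank {i : Nat} {n : String} (hi : i ≤ 4) (h : pvRank n = i) : pvC i n = true := by
  unfold pvRank at h
  interval_cases i <;> split_ifs at h <;> simp_all [pvC]

theorem pvRank_le_five (n : String) : pvRank n ≤ 5 := by
  unfold pvRank; split_ifs <;> omega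

theorem fold_le_init (ns : List String) (a : Nat) :
    ns.foldl (fun best name => min best (pvRank name)) a ≤ a := by
  induction ns generalizing a with
  | nil => simp
  | cons n xs ih =>
    simp only [List.foldl_cons]
    exact le_trans (ih _) (Nat.min_le_left _ _)

theorem fold_le_of_mem (ns : List String) (n : String) (a : Nat) (h : n ∈ ns) :
    ns.foldl (fun best name => min best (pvRank name)) a ≤ pvRank n := by
  induction ns generalizing a with
  | nil => simp at h
  | cons m xs ih =>
    simp only [List.foldl_cons]
    rcases List.mem_cons.mp h with rfl | h'
    · exact le_trans (fold_le_init _ _) (Nat.min_le_right _ _)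
    · exact ih _ h'

theorem fold_spec (ns : List String) (a : Nat) :
    ns.foldl (fun best name => min best (pvRank name)) a = a ∨
      ∃ n ∈ ns, ns.foldl (fun best name => min best (pvRank name)) a = pvRank n := by
  induction ns generalizing a with
  | nil => left; rfl
  | cons m xs ih =>
    simp only [List.foldl_cons]
    rcases ih (min a (pvRank m)) with h | ⟨n, hn, hfold⟩
    · rw [h]
      rcases Nat.le_total a (pvRank m) with hle | hle
      · left; omega
      · right; exact ⟨m, List.mem_cons_self .., by omega⟩
    · right; exact ⟨n, List.mem_cons_of_mem _ hn, hfold⟩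

-- A's truthiness test 'set & names' ↔ existence of a common element
theorem inter_nonempty_iff (L ns : List String) :
    (!(PySem.Set.inter (PySem.Set.ofList L) ns).isEmpty) = true ↔ ∃ x ∈ L, x ∈ ns := by
  constructor
  · intro h
    rcases List.exists_mem_of_ne_nil _ (by simpa [List.isEmpty_iff] using h) with ⟨x, hx⟩
    have hm := (PySem.Set.mem_inter _ _ _).mp hx
    exact ⟨x, (PySem.Set.mem_ofList _ _).mp hm.1, hm.2⟩
  · rintro ⟨x, hL, hns⟩
    have hx : x ∈ PySem.Set.inter (PySem.Set.ofList L) ns :=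
      (PySem.Set.mem_inter _ _ _).mpr ⟨(PySem.Set.mem_ofList _ _).mpr hL, hns⟩
    simp only [Bool.not_eq_eq_eq_not, Bool.not_true, Bool.eq_false_iff, Ne, List.isEmpty_iff]
    exact List.ne_nil_of_mem hx

-- each raw branch condition of A, indexed
def pvBranch (i : Nat) (ns : List String) : Bool :=
  match i with
  | 0 => ns.any (fun name => PySem.Str.startswith name "browser_")
  | 1 => ns.any (fun name => PySem.Str.startswith name "desktop_")
      || !(PySem.Set.inter (PySem.Set.ofList ["take_screenshot", "analyze_screenshot"]) ns).isEmpty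
  | 2 => !(PySem.Set.inter (PySem.Set.ofList ["set_timer", "list_timers", "cancel_timer"]) ns).isEmpty
  | 3 => !(PySem.Set.inter (PySem.Set.ofList ["write_file", "read_file", "list_files", "restore_checkpoint"]) ns).isEmpty
  | _ => !(PySem.Set.inter (PySem.Set.ofList ["get_current_task", "list_sessions", "read_session"]) ns).isEmpty

-- A's raw branch condition ↔ some name satisfies pvC i
theorem branch_iff (ns : List String) (i : Nat) (hi : i ≤ 4) :
    pvBranch i ns = true ↔ ∃ n ∈ ns, pvC i n = true := by
  interval_cases i <;>
    simp only [pvBranch, Bool.or_eq_true, inter_nonempty_iff, pvC, List.any_eq_true,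
      List.mem_cons, List.not_mem_nil, or_false, beq_iff_eq] <;>
    aesop

-- if branches 0..i-1 are all false and branch i true, every rank is ≥ i and some rank ≤ i, so the fold is i
theorem fold_eq (ns : List String) (i : Nat) (hi : i ≤ 4)
    (hlow : ∀ j, j < i → ¬ ∃ n ∈ ns, pvC j n = true)
    (hex : ∃ n ∈ ns, pvC i n = true) :
    ns.foldl (fun best name => min best (pvRank name)) 5 = i := by
  obtain ⟨n, hn, hc⟩ := hex
  have hub : ns.foldl (fun best name => min best (pvRank name)) 5 ≤ i :=
    le_trans (fold_le_of_mem _ _ _ hn) (pvRank_le_of_c hi hc)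
  have hlb : ∀ m ∈ ns, i ≤ pvRank m := by
    intro m hm
    rcases Nat.lt_or_ge (pvRank m) i with hlt | hge
    · exact absurd ⟨m, hm, c_of_pvRank (by omega) rfl⟩ (hlow _ hlt)
    · exact hge
  rcases fold_spec ns 5 with h | ⟨m, hm, h⟩
  · omega
  · have := hlb m hm; omega

theorem fold_eq_five (ns : List String)
    (hlow : ∀ j, j ≤ 4 → ¬ ∃ n ∈ ns, pvC j n = true) :
    ns.foldl (fun best name => min best (pvRank name)) 5 = 5 := by
  rcases fold_spec ns 5 with h | ⟨m, hm, h⟩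
  · exact h
  · have h5 := pvRank_le_five m
    have hne : ¬ pvRank m ≤ 4 := fun hle => hlow (pvRank m) hle ⟨m, hm, c_of_pvRank hle rfl⟩
    omega

-- ===== VERDICT (by name: the statement is the Claim_ definition above) =====
theorem category_from_recent_tools_py_spec : Claim_equal_category_from_recent_tools_py := by
  intro ns _
  show category_from_recent_tools_py ns = category_from_recent_tools_py_alt ns
  unfold category_from_recent_tools_py category_from_recent_tools_py_alt
  have b0 := branch_iff ns 0 (by omega)
  have b1 := branch_iff ns 1 (by omega)
  have b2 := branch_iff ns 2 (by omega)
  have b3 := branch_iff ns 3 (by omega)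
  have b4 := branch_iff ns 4 (by omega)
  simp only [pvBranch] at b0 b1 b2 b3 b4
  split_ifs with h0 h1 h2 h3 h4
  · rw [fold_eq ns 0 (by omega) (by omega) (b0.mp h0)]; rfl
  · have hl : ∀ j, j < 1 → ¬ ∃ n ∈ ns, pvC j n = true := by
      intro j hj; interval_cases j
      exact fun hx => h0 (b0.mpr hx)
    rw [fold_eq ns 1 (by omega) hl (b1.mp h1)]; rfl
  · have hl : ∀ j, j < 2 → ¬ ∃ n ∈ ns, pvC j n = true := by
      intro j hj; interval_cases j
      · exact fun hx => h0 (b0.mpr hx)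
      · exact fun hx => h1 (b1.mpr hx)
    rw [fold_eq ns 2 (by omega) hl (b2.mp h2)]; rfl
  · have hl : ∀ j, j < 3 → ¬ ∃ n ∈ ns, pvC j n = true := by
      intro j hj; interval_cases j
      · exact fun hx => h0 (b0.mpr hx)
      · exact fun hx => h1 (b1.mpr hx)
      · exact fun hx => h2 (b2.mpr hx)
    rw [fold_eq ns 3 (by omega) hl (b3.mp h3)]; rfl
  · have hl : ∀ j, j < 4 → ¬ ∃ n ∈ ns, pvC j n = true := by
      intro j hj; interval_cases j
      · exact fun hx => h0 (b0.mpr hx)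
      · exact fun hx => h1 (b1.mpr hx)
      · exact fun hx => h2 (b2.mpr hx)
      · exact fun hx => h3 (b3.mpr hx)
    rw [fold_eq ns 4 (by omega) hl (b4.mp h4)]; rfl
  · have hl : ∀ j, j ≤ 4 → ¬ ∃ n ∈ ns, pvC j n = true := by
      intro j hj; interval_cases j
      · exact fun hx => h0 (b0.mpr hx)
      · exact fun hx => h1 (b1.mpr hx)
      · exact fun hx => h2 (b2.mpr hx)
      · exact fun hx => h3 (b3.mpr hx)
      · exact fun hx => h4 (b4.mpr hx)
    rw [fold_eq_five ns hl]; rfl
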